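-- pv_equiv track=rewrite | github.com/Manakin-Wraith/scripdown_ai | backend/routes/langextract_routes.py | _best_display_text
-- ===== SOURCE A (Python) =====
-- def _best_display_text(a, b):
--     """
--     Pick the best display text between two variants.
--     Preference: Title Case > Mixed > lowercase > ALL CAPS
--     """
--     for text in (a, b):
--         t = (text or '').strip()
--         if t and not t.isupper() and not t.islower():
--             return t  # Title/mixed case preferred
--     # Fallback: prefer non-uppercase
--     a_stripped = (a or '').strip()
--     b_stripped = (b or '').strip()
--     if a_stripped and not a_stripped.isupper():
--         return a_stripped
--     if b_stripped and not b_stripped.isupper():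
--         return b_stripped
--     # Last resort: title-case the uppercase version
--     return a_stripped.title() if a_stripped else b_stripped.title()
-- ===== SOURCE B (Python) =====
-- def _best_display_text(a, b):
--     def entry(text):
--         t = (text or '').strip()
--         if not t:
--             r = 0
--         elif not t.isupper() and not t.islower():
--             r = 3
--         elif not t.isupper():
--             r = 2
--         else:
--             r = 1
--         return (r, t)
--     ra, ta = entry(a)
--     rb, tb = entry(b)
--     r, t = (rb, tb) if rb > ra else (ra, ta)
--     return t if r >= 2 else t.title()
-- ===== Notes on version B (the rewrite author's own statement) =====
-- stated objective: simpler
-- what changed: Replaces A's four-stage early-return cascade with a single rank function (0 empty, 1 all-caps, 2 lowercase, 3 mixed) computed once per argument, then one max-by-rank selection (a wins ties) and one title-case fallback for rank <= 1.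
import Mathlib
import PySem

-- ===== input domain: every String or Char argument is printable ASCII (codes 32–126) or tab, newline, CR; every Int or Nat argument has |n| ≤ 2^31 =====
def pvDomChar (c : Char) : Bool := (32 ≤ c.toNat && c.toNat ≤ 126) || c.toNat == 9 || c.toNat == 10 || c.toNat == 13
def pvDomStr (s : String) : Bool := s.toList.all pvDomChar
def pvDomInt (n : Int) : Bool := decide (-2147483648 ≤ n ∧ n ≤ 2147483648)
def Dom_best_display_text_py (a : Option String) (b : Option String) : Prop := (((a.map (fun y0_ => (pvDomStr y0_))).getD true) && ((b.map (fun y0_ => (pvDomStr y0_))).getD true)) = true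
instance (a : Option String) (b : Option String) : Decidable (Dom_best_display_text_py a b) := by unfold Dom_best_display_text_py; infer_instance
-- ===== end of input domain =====

-- B replaces A's four-stage early-return cascade by a single case rank per argument
-- plus one max-by-rank selection (objective: simpler).

-- str.isupper(): some cased char, and no lowercase char — exact on the ASCII domain
def pyIsupper (cs : List Char) : Bool :=
  cs.any (fun c => PySem.Chars.isalpha c) && cs.all (fun c => !PySem.Chars.islower c)

-- str.islower(): some cased char, and no uppercase char — exact on the ASCII domain
def pyIslower (cs : List Char) : Bool :=
  cs.any (fun c => PySem.Chars.isalpha c) && cs.all (fun c => !PySem.Chars.isupper c)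

-- str.title(): uppercase a letter after a non-letter, lowercase one after a letter — exact on the ASCII domain
def pyTitle : List Char → Bool → List Char
  | [], _ => []
  | c :: rest, prevCased =>
    let cased := PySem.Chars.isalpha c
    (if cased then (if prevCased then PySem.Chars.lowerChar c else PySem.Chars.upperChar c) else c)
      :: pyTitle rest cased

-- ===== PORT A =====
-- the 'for text in (a, b)' loop: first stripped text that is nonempty, not isupper, not islower
def pickMixed : List (Option String) → Option (List Char)
  | [] => none
  | text :: rest =>
    let t := PySem.Chars.strip (text.getD "").toList
    if !t.isEmpty && !pyIsupper t && !pyIslower t then some t else pickMixed rest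

def best_display_text_py (a : Option String) (b : Option String) : String :=
  match pickMixed [a, b] with
  | some t => String.ofList t
  | none =>
    let a_stripped := PySem.Chars.strip (a.getD "").toList
    let b_stripped := PySem.Chars.strip (b.getD "").toList
    if !a_stripped.isEmpty && !pyIsupper a_stripped then String.ofList a_stripped
    else if !b_stripped.isEmpty && !pyIsupper b_stripped then String.ofList b_stripped
    else if !a_stripped.isEmpty then String.ofList (pyTitle a_stripped false)
    else String.ofList (pyTitle b_stripped false)

-- ===== PORT B =====
def rankEntry (text : Option String) : Nat × List Char :=
  let t := PySem.Chars.strip (text.getD "").toList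
  let r : Nat :=
    if t.isEmpty then 0
    else if !pyIsupper t && !pyIslower t then 3
    else if !pyIsupper t then 2
    else 1
  (r, t)

def best_display_text_py_alt (a : Option String) (b : Option String) : String :=
  let ea := rankEntry a
  let eb := rankEntry b
  let best := if ea.1 < eb.1 then eb else ea
  if 2 ≤ best.1 then String.ofList best.2 else String.ofList (pyTitle best.2 false)

-- ===== PRECONDITION & SPEC =====
def Spec_best_display_text_py (a : Option String) (b : Option String) (out : String) : Prop := out = best_display_text_py_alt a b
instance (a : Option String) (b : Option String) (out : String) : Decidable (Spec_best_display_text_py a b out) := by unfold Spec_best_display_text_py; infer_instance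

-- ===== CLAIM (what is proved, stated in full; the proofs are below) =====
def Claim_equal_best_display_text_py : Prop := ∀ (a : Option String) (b : Option String), Dom_best_display_text_py a b → Spec_best_display_text_py a b (best_display_text_py a b)

-- ===== LEMMAS AND PROOFS =====

-- ===== VERDICT (by name: the statement is the Claim_ definition above) =====
theorem best_display_text_py_spec : Claim_equal_best_display_text_py := by
  intro a b _
  show best_display_text_py a b = best_display_text_py_alt a b
  simp only [best_display_text_py, best_display_text_py_alt, pickMixed, rankEntry]
  by_cases h1 : (PySem.Chars.strip (a.getD "").toList).isEmpty = true <;>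
  by_cases h2 : pyIsupper (PySem.Chars.strip (a.getD "").toList) = true <;>
  by_cases h3 : pyIslower (PySem.Chars.strip (a.getD "").toList) = true <;>
  by_cases h4 : (PySem.Chars.strip (b.getD "").toList).isEmpty = true <;>
  by_cases h5 : pyIsupper (PySem.Chars.strip (b.getD "").toList) = true <;>
  by_cases h6 : pyIslower (PySem.Chars.strip (b.getD "").toList) = true <;>
  simp [h1, h2, h3, h4, h5, h6, List.isEmpty_iff.mp] at *
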